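-- pv_equiv track=rewrite | github.com/tarunpre/dsa-cracker | codility/max_number_using_5.py | solution
-- ===== SOURCE A (Python) =====
-- def solution(S, K):
--     if K > len(S):
--         return "IMPOSSIBLE"
--     SL = list(S)
--     for s in range(len(SL)):
--         if K > 0:
--             if int(SL[s]) < 5:
--                 SL[s] = '5'
--                 K -= 1
--     for s in range(len(SL)-1, -1 , -1):
--         if K > 0:
--             if int(SL[s]) !=  5:
--                 SL[s] = '5'
--                 K -= 1
--
--     if K:
--         return "IMPOSSIBLE"
--     return "".join(SL)
-- ===== SOURCE B (Python) =====
-- def solution(S, K):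
--     n = len(S)
--     if K < 0 or K > n:
--         return "IMPOSSIBLE"
--     a = sum(c < '5' for c in S)
--     b = sum(c > '5' for c in S)
--     if K > a + b:
--         return "IMPOSSIBLE"
--     t = min(K, a)          # leftmost t digits below 5 become '5'
--     r = K - t              # rightmost r digits above 5 become '5'
--     out = []
--     seen_small = 0
--     seen_large = 0
--     for c in S:
--         if c < '5':
--             out.append('5' if seen_small < t else c)
--             seen_small += 1
--         elif c > '5':
--             seen_large += 1
--             out.append('5' if b - seen_large < r else c)
--         else:
--             out.append(c)
--     return "".join(out)
-- ===== Notes on version B (the rewrite author's own statement) =====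
-- stated objective: alternative
-- what changed: A mutates the list in two budget-decrementing passes (left-to-right replacing digits below 5, then right-to-left replacing the rest); B counts the digits below/above '5' once, decides feasibility and the exact replacement thresholds up front, and emits the result in one constructive pass with seen-counters.
-- outside the precondition, e.g. on solution('0x', 1): A returns '5x', B returns '5x'
import Mathlib
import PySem

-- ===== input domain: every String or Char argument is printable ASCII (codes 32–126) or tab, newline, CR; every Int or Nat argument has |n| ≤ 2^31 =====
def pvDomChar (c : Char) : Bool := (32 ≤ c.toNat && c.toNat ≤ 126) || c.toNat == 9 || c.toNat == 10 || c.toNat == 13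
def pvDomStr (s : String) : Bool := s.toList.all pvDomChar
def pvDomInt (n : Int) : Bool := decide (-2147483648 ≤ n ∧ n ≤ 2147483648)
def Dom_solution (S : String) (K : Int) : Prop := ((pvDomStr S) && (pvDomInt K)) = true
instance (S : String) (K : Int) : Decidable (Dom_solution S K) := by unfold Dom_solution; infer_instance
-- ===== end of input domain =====

-- B replaces A's two budget-mutating in-place passes by counting the digits below/above '5' once and
-- emitting the answer in a single constructive pass (alternative decomposition, same cost); return-value
-- equivalence only, proved on Pre_solution.

-- ===== PORT A =====
-- int(SL[s]) for the one-character string; the `.getD 5` default only totalises the function: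
-- on inputs admitted by Pre_solution every character it is applied to is an ASCII digit
-- (where Python's int() would raise ValueError the input is outside Pre_solution).
def pvIntOf (c : Char) : Int := (PySem.Int.ofStr? (String.ofList [c])).getD 5

-- first Python loop, left to right over (SL, K)
def pvLoop1 : List Char → Int → List Char × Int
  | [], K => ([], K)
  | c :: t, K =>
    if K > 0 ∧ pvIntOf c < 5 then
      let p := pvLoop1 t (K - 1); ('5' :: p.1, p.2)
    else
      let p := pvLoop1 t K; (c :: p.1, p.2)

-- second Python loop, right to left over (SL, K): the tail (rightmost part) is processed first
def pvLoop2 : List Char → Int → List Char × Int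
  | [], K => ([], K)
  | c :: t, K =>
    let p := pvLoop2 t K
    if p.2 > 0 ∧ pvIntOf c ≠ 5 then ('5' :: p.1, p.2 - 1) else (c :: p.1, p.2)

def solution (S : String) (K : Int) : String :=
  if K > (S.toList.length : Int) then "IMPOSSIBLE"
  else
    let p1 := pvLoop1 S.toList K
    let p2 := pvLoop2 p1.1 p1.2
    if p2.2 ≠ 0 then "IMPOSSIBLE" else String.ofList p2.1

-- ===== PORT B =====
-- sum(c < '5' for c in S) / sum(c > '5' for c in S)
def pvCount (p : Char → Bool) (l : List Char) : Int :=
  l.foldl (fun acc c => if p c then acc + 1 else acc) 0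

-- the single constructive pass of Source B, carrying (t, r, b, seen_small, seen_large)
def pvBuild : List Char → Int → Int → Int → Int → Int → List Char
  | [], _, _, _, _, _ => []
  | c :: rest, t, r, b, ss, sl =>
    if c < '5' then (if ss < t then '5' else c) :: pvBuild rest t r b (ss + 1) sl
    else if c > '5' then (if b - (sl + 1) < r then '5' else c) :: pvBuild rest t r b ss (sl + 1)
    else c :: pvBuild rest t r b ss sl

def solution_alt (S : String) (K : Int) : String :=
  let L := S.toList
  if K < 0 ∨ K > (L.length : Int) then "IMPOSSIBLE"
  else
    let a := pvCount (fun c => decide (c < '5')) L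
    let b := pvCount (fun c => decide ('5' < c)) L
    if K > a + b then "IMPOSSIBLE"
    else
      let t := min K a
      let r := K - t
      String.ofList (pvBuild L t r b 0 0)

-- ===== PRECONDITION & SPEC =====
-- Pre_ excludes the inputs on which A's int() meets a non-digit character: on almost all of them A
-- raises ValueError; on the few where the replacement budget is exhausted before the first non-digit
-- A still returns, and B returns the same string there (see claim.json cites).
def Pre_solution (S : String) (K : Int) : Prop :=
  K ≤ 0 ∨ K > (S.toList.length : Int) ∨ S.toList.all Char.isDigit = true
instance (S : String) (K : Int) : Decidable (Pre_solution S K) := by unfold Pre_solution; infer_instance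

def pvWitness_solution : String × Int := ("2748", 2)

def Spec_solution (S : String) (K : Int) (out : String) : Prop := out = solution_alt S K
instance (S : String) (K : Int) (out : String) : Decidable (Spec_solution S K out) := by unfold Spec_solution; infer_instance

-- ===== CLAIM (what is proved, stated in full; the proofs are below) =====
def Claim_equal_solution : Prop := ∀ (S : String) (K : Int), Dom_solution S K → Pre_solution S K → Spec_solution S K (solution S K)

-- ===== LEMMAS AND PROOFS =====

theorem digit_cases (c : Char) (h : c.isDigit = true) :
    c = '0' ∨ c = '1' ∨ c = '2' ∨ c = '3' ∨ c = '4' ∨ c = '5' ∨ c = '6' ∨ c = '7' ∨ c = '8' ∨ c = '9' := by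
  simp [Char.isDigit] at h
  obtain ⟨h1, h2⟩ := h
  have hc : c = Char.ofNat c.toNat := (Char.ofNat_toNat c).symm
  have h1' : 48 ≤ c.toNat := h1
  have h2' : c.toNat ≤ 57 := h2
  interval_cases hn : c.toNat <;> rw [hc] <;> decide

theorem pvIntOf_lt5 (c : Char) (h : c.isDigit = true) : (pvIntOf c < 5) ↔ (c < '5') := by
  rcases digit_cases c h with rfl|rfl|rfl|rfl|rfl|rfl|rfl|rfl|rfl|rfl <;> decide

theorem pvIntOf_ne5 (c : Char) (h : c.isDigit = true) : (pvIntOf c ≠ 5) ↔ (c ≠ '5') := by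
  rcases digit_cases c h with rfl|rfl|rfl|rfl|rfl|rfl|rfl|rfl|rfl|rfl <;> decide

theorem pvCount_foldl (p : Char → Bool) (l : List Char) (acc : Int) :
    l.foldl (fun acc c => if p c then acc + 1 else acc) acc = acc + pvCount p l := by
  induction l generalizing acc with
  | nil => simp [pvCount]
  | cons c t ih =>
    have h2 : pvCount p (c :: t) = (if p c then (1 : Int) else 0) + pvCount p t := by
      simp only [pvCount, List.foldl]
      rw [ih]
      by_cases h : p c <;> simp [h, pvCount]
    rw [List.foldl, ih, h2]
    by_cases h : p c <;> simp [h, pvCount] <;> try ring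

theorem pvCount_cons (p : Char → Bool) (c : Char) (t : List Char) :
    pvCount p (c :: t) = (if p c then 1 else 0) + pvCount p t := by
  simp only [pvCount, List.foldl]
  rw [pvCount_foldl]
  by_cases h : p c <;> simp [h, pvCount]

theorem pvCount_nonneg (p : Char → Bool) (l : List Char) : 0 ≤ pvCount p l := by
  induction l with
  | nil => simp [pvCount]
  | cons c t ih => rw [pvCount_cons]; by_cases h : p c <;> simp [h] <;> omega

theorem pvLoop1_nonpos (l : List Char) (K : Int) (h : K ≤ 0) : pvLoop1 l K = (l, K) := by
  induction l with
  | nil => rfl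
  | cons c t ih =>
    simp only [pvLoop1]
    rw [if_neg (by rintro ⟨h1, -⟩; omega), ih]

theorem pvLoop2_nonpos (l : List Char) (K : Int) (h : K ≤ 0) : pvLoop2 l K = (l, K) := by
  induction l with
  | nil => rfl
  | cons c t ih =>
    simp only [pvLoop2, ih]
    rw [if_neg (by rintro ⟨h1, -⟩; omega)]

-- the first pass, described directly: replace the leftmost K characters below '5'
def pvRepS : List Char → Int → List Char
  | [], _ => []
  | c :: t, K => if K > 0 ∧ c < '5' then '5' :: pvRepS t (K - 1) else c :: pvRepS t K

theorem pvRepS_nonpos (l : List Char) (K : Int) (h : K ≤ 0) : pvRepS l K = l := by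
  induction l with
  | nil => rfl
  | cons c t ih =>
    simp only [pvRepS]
    rw [if_neg (by rintro ⟨h1, -⟩; omega), ih]

theorem pvLoop1_eq (l : List Char) (K : Int) (hd : ∀ c ∈ l, c.isDigit = true) (hK : 0 ≤ K) :
    pvLoop1 l K = (pvRepS l K, K - min K (pvCount (fun c => decide (c < '5')) l)) := by
  induction l generalizing K with
  | nil => simp [pvLoop1, pvRepS, pvCount]; omega
  | cons c t ih =>
    have hdc : c.isDigit = true := hd c (by simp)
    have hdt : ∀ x ∈ t, x.isDigit = true := fun x hx => hd x (by simp [hx])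
    have hnn := pvCount_nonneg (fun c => decide (c < '5')) t
    rw [pvCount_cons]
    by_cases hlt : c < '5'
    · by_cases hKp : K > 0
      · have hg : K > 0 ∧ pvIntOf c < 5 := ⟨hKp, (pvIntOf_lt5 c hdc).mpr hlt⟩
        simp only [pvLoop1, pvRepS, if_pos hg, if_pos (⟨hKp, hlt⟩ : K > 0 ∧ c < '5'),
          ih (K - 1) hdt (by omega)]
        simp [hlt]
        omega
      · have hK0 : K = 0 := by omega
        subst hK0
        simp only [pvLoop1, pvRepS]
        rw [if_neg (by simp), if_neg (by simp), pvLoop1_nonpos t 0 le_rfl,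
          pvRepS_nonpos t 0 le_rfl]
        simp [hlt]
        omega
    · have hg : ¬ (K > 0 ∧ pvIntOf c < 5) := by
        intro hh; exact hlt ((pvIntOf_lt5 c hdc).mp hh.2)
      simp only [pvLoop1, pvRepS, if_neg hg, if_neg (fun hh : K > 0 ∧ c < '5' => hlt hh.2),
        ih K hdt hK]
      simp [hlt]

-- replace every character below '5'
def pvMapS (l : List Char) : List Char := l.map (fun c => if c < '5' then '5' else c)

theorem pvRepS_all (l : List Char) (K : Int)
    (h : pvCount (fun c => decide (c < '5')) l ≤ K) : pvRepS l K = pvMapS l := by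
  induction l generalizing K with
  | nil => rfl
  | cons c t ih =>
    have hnn := pvCount_nonneg (fun c => decide (c < '5')) t
    rw [pvCount_cons] at h
    by_cases hlt : c < '5'
    · have h' : 1 + pvCount (fun c => decide (c < '5')) t ≤ K := by simpa [hlt] using h
      simp only [pvRepS, pvMapS, List.map, if_pos (⟨by omega, hlt⟩ : K > 0 ∧ c < '5'), if_pos hlt]
      exact congrArg _ (ih (K - 1) (by omega))
    · have h : pvCount (fun c => decide (c < '5')) t ≤ K := by simpa [hlt] using h
      simp only [pvRepS, pvMapS, List.map, if_neg (fun hh : K > 0 ∧ c < '5' => hlt hh.2),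
        if_neg hlt]
      simp only [pvMapS] at ih
      rw [ih K (by omega)]

-- the second pass on the fully-small-replaced list equals Source B's constructive pass, and its
-- leftover budget is r - min r (#larges)
theorem pvLoop2_build (l : List Char) (r a₀ b₀ ss sl : Int)
    (hd : ∀ c ∈ l, c.isDigit = true) (hr : 0 ≤ r)
    (ha : ss + pvCount (fun c => decide (c < '5')) l = a₀)
    (hb : sl + pvCount (fun c => decide ('5' < c)) l = b₀) :
    pvLoop2 (pvMapS l) r =
      (pvBuild l a₀ r b₀ ss sl, r - min r (pvCount (fun c => decide ('5' < c)) l)) := by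
  induction l generalizing ss sl with
  | nil => simp [pvLoop2, pvMapS, pvBuild, pvCount]; omega
  | cons c t ih =>
    have hdc : c.isDigit = true := hd c (by simp)
    have hdt : ∀ x ∈ t, x.isDigit = true := fun x hx => hd x (by simp [hx])
    have hnns := pvCount_nonneg (fun c => decide (c < '5')) t
    have hnnl := pvCount_nonneg (fun c => decide ('5' < c)) t
    rw [pvCount_cons] at ha hb
    by_cases hlt : c < '5'
    · have hgt : ¬ ('5' < c) := by
        intro hh; exact absurd (lt_trans hlt hh) (lt_irrefl c)
      have ih' := ih (ss + 1) sl hdt (by simp [hlt] at ha; omega) (by simp [hgt] at hb; omega)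
      simp only [pvMapS, List.map, if_pos hlt] at ih' ⊢
      simp only [pvLoop2, pvBuild, if_pos hlt, ih']
      have h5 : ¬ (pvIntOf '5' ≠ 5) := by decide
      rw [if_neg (fun hh => h5 hh.2)]
      have hss : ss < a₀ := by simp [hlt] at ha; omega
      rw [pvCount_cons]
      simp [hss, hgt]
    · by_cases heq : c = '5'
      · subst heq
        have hgt : ¬ ('5' < '5') := lt_irrefl _
        have ih' := ih ss sl hdt (by simp at ha; omega) (by simp at hb; omega)
        simp only [pvMapS, List.map, if_neg hlt] at ih' ⊢
        simp only [pvLoop2, pvBuild, if_neg hlt, ih']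
        have h5 : ¬ (pvIntOf '5' ≠ 5) := by decide
        rw [if_neg (fun hh => h5 hh.2), pvCount_cons]
        simp
      · have hgt : '5' < c := by
          rcases lt_trichotomy c '5' with h|h|h
          · exact absurd h hlt
          · exact absurd h heq
          · exact h
        have ih' := ih ss (sl + 1) hdt (by simp [hlt] at ha; omega)
          (by simp [hgt] at hb; omega)
        simp only [pvMapS, List.map, if_neg hlt] at ih' ⊢
        simp only [pvLoop2, pvBuild, if_neg hlt, if_pos hgt, ih']
        have hne : pvIntOf c ≠ 5 := (pvIntOf_ne5 c hdc).mpr heq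
        have hbeq : b₀ - (sl + 1) = pvCount (fun c => decide ('5' < c)) t := by
          simp [hgt] at hb; omega
        by_cases hcase : pvCount (fun c => decide ('5' < c)) t < r
        · rw [if_pos ⟨by omega, hne⟩, if_pos (by omega), pvCount_cons]
          simp [hgt]
          omega
        · rw [if_neg (fun hh => absurd hh.1 (by omega)), if_neg (by omega), pvCount_cons]
          simp [hgt]
          omega

-- Source B's pass with r = 0 replaces exactly the leftmost (t - ss) characters below '5'
theorem pvBuild_r0 (l : List Char) (t b₀ ss sl : Int)
    (hb : sl + pvCount (fun c => decide ('5' < c)) l ≤ b₀) :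
    pvBuild l t 0 b₀ ss sl = pvRepS l (max (t - ss) 0) := by
  induction l generalizing ss sl with
  | nil => rfl
  | cons c t' ih =>
    have hnnl := pvCount_nonneg (fun c => decide ('5' < c)) t'
    rw [pvCount_cons] at hb
    by_cases hlt : c < '5'
    · have hgt : ¬ ('5' < c) := fun hh => absurd (lt_trans hlt hh) (lt_irrefl c)
      simp only [pvBuild, if_pos hlt, pvRepS]
      by_cases hss : ss < t
      · have hx : max (t - (ss + 1)) 0 = max (t - ss) 0 - 1 := by omega
        rw [if_pos hss, if_pos ⟨by omega, hlt⟩, ih (ss + 1) sl (by simp [hgt] at hb; omega), hx]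
      · have hx : max (t - (ss + 1)) 0 = max (t - ss) 0 := by omega
        rw [if_neg hss, if_neg (fun hh : max (t - ss) 0 > 0 ∧ c < '5' => absurd hh.1 (by omega)),
          ih (ss + 1) sl (by simp [hgt] at hb; omega), hx]
    · by_cases hgt : '5' < c
      · simp only [pvBuild, if_neg hlt, if_pos hgt, pvRepS]
        have hno : ¬ (b₀ - (sl + 1) < 0) := by simp [hgt] at hb; omega
        rw [if_neg hno, if_neg (fun hh : max (t - ss) 0 > 0 ∧ c < '5' => hlt hh.2),
          ih ss (sl + 1) (by simp [hgt] at hb; omega)]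
      · simp only [pvBuild, if_neg hlt, if_neg hgt, pvRepS]
        rw [if_neg (fun hh : max (t - ss) 0 > 0 ∧ c < '5' => hlt hh.2),
          ih ss sl (by simp [hgt] at hb; omega)]

-- ===== VERDICT (by name: the statement is the Claim_ definition above) =====
theorem solution_spec : Claim_equal_solution := by
  unfold Claim_equal_solution
  intro S K _ hpre
  unfold Spec_solution solution solution_alt
  set l := S.toList with hl
  have hnns := pvCount_nonneg (fun c => decide (c < '5')) l
  have hnnl := pvCount_nonneg (fun c => decide ('5' < c)) l
  by_cases hlen : K > (l.length : Int)
  · simp [hlen]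
  · rw [if_neg hlen]
    by_cases hneg : K < 0
    · rw [pvLoop1_nonpos l K (by omega)]
      simp only
      rw [pvLoop2_nonpos l K (by omega)]
      simp only
      rw [if_pos (by omega), if_pos (Or.inl hneg)]
    · rw [if_neg (by omega : ¬ (K < 0 ∨ K > (l.length : Int)))]
      by_cases hK0 : K = 0
      · subst hK0
        rw [pvLoop1_nonpos l 0 le_rfl]
        simp only
        rw [pvLoop2_nonpos l 0 le_rfl]
        simp only
        rw [if_neg (by omega), if_neg (by omega)]
        have h1 : min (0 : Int) (pvCount (fun c => decide (c < '5')) l) = 0 := by omega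
        rw [h1]
        norm_num
        rw [pvBuild_r0 l 0 _ 0 0 (by omega)]
        norm_num
        rw [pvRepS_nonpos l 0 le_rfl]
      · have hKpos : 0 < K := by omega
        have hdig : ∀ c ∈ l, c.isDigit = true := by
          rcases hpre with h|h|h
          · omega
          · rw [hl] at hlen; omega
          · intro c hc
            exact List.all_eq_true.mp h c hc
        set a := pvCount (fun c => decide (c < '5')) l with hadef
        set b := pvCount (fun c => decide ('5' < c)) l with hbdef
        rw [pvLoop1_eq l K hdig (by omega)]
        simp only
        by_cases hKa : K ≤ a
        · have hmin : min K a = K := by omega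
          rw [hmin]
          norm_num
          rw [pvLoop2_nonpos _ 0 le_rfl]
          simp only
          rw [if_pos trivial, if_neg (by omega : ¬ a + b < K), pvBuild_r0 l K b 0 0 (by omega)]
          have hx : max (K - 0) 0 = K := by omega
          rw [hx]
        · have hmin : min K a = a := by omega
          rw [hmin]
          have hrs : pvRepS l K = pvMapS l := pvRepS_all l K (by omega)
          rw [hrs, pvLoop2_build l (K - a) a b 0 0 hdig (by omega) (by omega) (by omega)]
          simp only
          by_cases hab : K > a + b
          · rw [if_pos (by omega), if_pos hab]
          · have : min (K - a) b = K - a := by omega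
            rw [this]
            rw [if_neg (by omega), if_neg hab]
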